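-- pv_equiv track=rewrite | github.com/limeira94/LearnTDD | solution.py | solution
-- ===== SOURCE A (Python) =====
-- def solution(s):
--
--     result = []
--     for i in range(0, len(s), 2):
--         if len(s) % 2 == 0:
--             result.append(s[i:i+2])
--         else:
--             s += '_'
--             result.append(s[i:i+2])
--     return result
-- ===== SOURCE B (Python) =====
-- def solution(s):
--     result = []
--     for ch in s:
--         if result and len(result[-1]) < 2:
--             result[-1] += ch
--         else:
--             result.append(ch)
--     if result and len(result[-1]) == 1:
--         result[-1] += '_'
--     return result
-- ===== Notes on version B (the rewrite author's own statement) =====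
-- stated objective: simpler
-- what changed: B makes a single pass over the characters, growing the last chunk or starting a new one, and pads the final chunk once at the end, instead of A's stride-2 index loop that slices and mutates the string inside the loop.
import Mathlib
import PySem

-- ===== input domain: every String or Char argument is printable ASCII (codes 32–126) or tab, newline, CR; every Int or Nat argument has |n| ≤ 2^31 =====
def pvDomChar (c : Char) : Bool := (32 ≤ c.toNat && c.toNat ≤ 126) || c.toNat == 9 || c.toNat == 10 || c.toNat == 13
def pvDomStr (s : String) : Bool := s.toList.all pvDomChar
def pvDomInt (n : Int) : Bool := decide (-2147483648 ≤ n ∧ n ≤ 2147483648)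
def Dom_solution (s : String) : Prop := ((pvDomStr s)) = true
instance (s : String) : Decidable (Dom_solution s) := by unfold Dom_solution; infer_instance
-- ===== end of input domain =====

-- B replaces A's stride-2 slicing loop (which mutates the string inside the loop) by a single
-- character-by-character pass that grows the last chunk, padding it once at the end: simpler.

-- ===== PORT A =====
-- loop body of A: i runs over range(0, len(s), 2); state = (current s, result)
def solutionStep (st : List Char × List (List Char)) (i : Int) : List Char × List (List Char) :=
  if st.1.length % 2 = 0 then
    (st.1, st.2 ++ [PySem.List.slice st.1 (some i) (some (i + 2))])
  else
    let s' := st.1 ++ ['_']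
    (s', st.2 ++ [PySem.List.slice s' (some i) (some (i + 2))])

def solution (s : String) : List String :=
  (((PySem.List.pyRange 0 (s.toList.length : Int) 2).foldl solutionStep (s.toList, [])).2).map
    String.ofList

-- ===== PORT B =====
-- B keeps the result with the most recent chunk at the head and reverses at the end
-- (Python appends at the tail and edits result[-1]).
def altStep (rev : List (List Char)) (c : Char) : List (List Char) :=
  match rev with
  | [] => [[c]]
  | last :: rest => if last.length < 2 then (last ++ [c]) :: rest else [c] :: last :: rest

-- B's final fix-up: if the last chunk has one char, append '_'
def padHead (rev : List (List Char)) : List (List Char) :=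
  match rev with
  | [] => []
  | last :: rest => if last.length = 1 then (last ++ ['_']) :: rest else last :: rest

def solution_alt (s : String) : List String :=
  ((padHead (s.toList.foldl altStep [])).reverse).map String.ofList

-- ===== PRECONDITION & SPEC =====
def Spec_solution (s : String) (out : List String) : Prop := out = solution_alt s
instance (s : String) (out : List String) : Decidable (Spec_solution s out) := by unfold Spec_solution; infer_instance

-- ===== CLAIM (what is proved, stated in full; the proofs are below) =====
def Claim_equal_solution : Prop := ∀ (s : String), Dom_solution s → Spec_solution s (solution s)

-- ===== LEMMAS AND PROOFS =====

-- the common characterisation: two-char chunks, last padded with '_'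
def chunks : List Char → List (List Char)
  | [] => []
  | [c] => [[c, '_']]
  | c1 :: c2 :: rest => [c1, c2] :: chunks rest

-- reversed chunking without padding (what B's fold produces)
def pairRev : List Char → List (List Char)
  | [] => []
  | [c] => [[c]]
  | c1 :: c2 :: rest => pairRev rest ++ [[c1, c2]]

lemma pyRange2_nil (a b : Int) (h : b ≤ a) : PySem.List.pyRange a b 2 = [] := by
  rw [PySem.List.pyRange_of_pos a b (by norm_num), if_neg (by omega)]
  simp

lemma pyRange2_cons (a b : Int) (h : a < b) :
    PySem.List.pyRange a b 2 = a :: PySem.List.pyRange (a + 2) b 2 := by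
  rw [PySem.List.pyRange_of_pos a b (by norm_num),
      PySem.List.pyRange_of_pos (a + 2) b (by norm_num)]
  by_cases h2 : a + 2 < b
  · rw [if_pos h, if_pos h2]
    have hm' : ((b - a + 2 - 1) / 2).toNat = ((b - (a + 2) + 2 - 1) / 2).toNat + 1 := by omega
    rw [hm', List.range_succ_eq_map]
    simp [List.map_map, Function.comp]
    intro k _
    ring
  · rw [if_pos h, if_neg h2]
    have hone : ((b - a + 2 - 1) / 2).toNat = 1 := by omega
    rw [hone]
    simp

lemma pyRange2_odd (n : Nat) (h : n % 2 = 1) :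
    PySem.List.pyRange 2 (n : Int) 2 = PySem.List.pyRange 2 ((n : Int) + 1) 2 := by
  rw [PySem.List.pyRange_of_pos 2 (n : Int) (by norm_num),
      PySem.List.pyRange_of_pos 2 ((n : Int) + 1) (by norm_num)]
  congr 1
  congr 1
  split_ifs <;> omega

lemma chunks_pad (cs : List Char) (h : cs.length % 2 = 1) :
    chunks (cs ++ ['_']) = chunks cs := by
  induction cs using chunks.induct with
  | case1 => simp at h
  | case2 c => rfl
  | case3 c1 c2 rest ih =>
      simp only [List.length_cons] at h
      simp only [List.cons_append, chunks]
      rw [ih (by omega)]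

lemma Aeven (cs : List Char) : ∀ (pre : List Char) (res : List (List Char)),
    pre.length % 2 = 0 → cs.length % 2 = 0 →
    (PySem.List.pyRange (pre.length : Int) ((pre.length : Int) + (cs.length : Int)) 2).foldl
        solutionStep (pre ++ cs, res)
      = (pre ++ cs, res ++ chunks cs) := by
  induction cs using chunks.induct with
  | case1 =>
      intro pre res _ _
      rw [show ((pre.length : Int) + ((List.length ([] : List Char)) : Int)) = (pre.length : Int)
            by simp,
          pyRange2_nil _ _ le_rfl]
      simp [chunks]
  | case2 c =>
      intro pre res _ h2
      simp at h2
  | case3 c1 c2 rest ih =>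
      intro pre res hpre hcs
      simp only [List.length_cons] at hcs
      have hlt : (pre.length : Int) < (pre.length : Int) + (((c1 :: c2 :: rest).length : Nat) : Int) := by
        simp only [List.length_cons]
        push_cast
        omega
      rw [pyRange2_cons _ _ hlt, List.foldl_cons]
      have hpar : (pre ++ c1 :: c2 :: rest).length % 2 = 0 := by
        simp only [List.length_append, List.length_cons]
        omega
      have hsl : PySem.List.slice (pre ++ c1 :: c2 :: rest) (some (pre.length : Int))
          (some ((pre.length : Int) + 2)) = [c1, c2] := by
        have hx := PySem.List.slice_natCast_add (pre ++ c1 :: c2 :: rest) pre.length 2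
        push_cast at hx
        rw [hx]
        simp
      have hstep : solutionStep (pre ++ c1 :: c2 :: rest, res) (pre.length : Int)
          = (pre ++ c1 :: c2 :: rest, res ++ [[c1, c2]]) := by
        simp only [solutionStep]
        rw [if_pos hpar, hsl]
      rw [hstep]
      have ih' := ih (pre ++ [c1, c2]) (res ++ [[c1, c2]])
        (by simp only [List.length_append, List.length_cons, List.length_nil]; omega)
        (by omega)
      have hb1 : (((pre ++ [c1, c2]).length : Nat) : Int) = (pre.length : Int) + 2 := by
        simp
      rw [hb1] at ih'
      rw [show (pre ++ [c1, c2]) ++ rest = pre ++ c1 :: c2 :: rest by simp] at ih'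
      rw [show (pre.length : Int) + (((c1 :: c2 :: rest).length : Nat) : Int)
            = (pre.length : Int) + 2 + ((rest.length : Nat) : Int) by
              simp only [List.length_cons]; push_cast; ring]
      rw [ih']
      simp [chunks]

lemma pairRev_ne_nil (cs : List Char) (h : cs ≠ []) : pairRev cs ≠ [] := by
  induction cs using pairRev.induct with
  | case1 => exact absurd rfl h
  | case2 c => simp [pairRev]
  | case3 c1 c2 rest ih => simp [pairRev]

lemma foldB (cs : List Char) : ∀ (rev : List (List Char)),
    (rev = [] ∨ ∃ h t, rev = h :: t ∧ h.length = 2) →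
    cs.foldl altStep rev = pairRev cs ++ rev := by
  induction cs using pairRev.induct with
  | case1 => intro rev _; simp [pairRev]
  | case2 c =>
      intro rev hrev
      rcases hrev with rfl | ⟨h, t, rfl, hl⟩
      · rfl
      · simp [altStep, pairRev, hl]
  | case3 c1 c2 rest ih =>
      intro rev hrev
      have h1 : altStep rev c1 = [c1] :: rev := by
        rcases hrev with rfl | ⟨h, t, rfl, hl⟩
        · rfl
        · simp [altStep, hl]
      have h2 : altStep ([c1] :: rev) c2 = [c1, c2] :: rev := by
        simp [altStep]
      simp only [List.foldl_cons, h1, h2]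
      rw [ih ([c1, c2] :: rev) (Or.inr ⟨[c1, c2], rev, rfl, rfl⟩)]
      simp [pairRev]

lemma padHead_append (xs ys : List (List Char)) (h : xs ≠ []) :
    padHead (xs ++ ys) = padHead xs ++ ys := by
  cases xs with
  | nil => exact absurd rfl h
  | cons a t =>
      simp only [List.cons_append, padHead]
      split_ifs <;> simp

lemma B_chunks (cs : List Char) : (padHead (pairRev cs)).reverse = chunks cs := by
  induction cs using chunks.induct with
  | case1 => rfl
  | case2 c => rfl
  | case3 c1 c2 rest ih =>
      by_cases ht : rest = []
      · subst ht; rfl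
      · have hne := pairRev_ne_nil rest ht
        simp only [pairRev, chunks]
        rw [padHead_append _ _ hne]
        simp [ih]

lemma A_chunks (cs : List Char) :
    ((PySem.List.pyRange 0 (cs.length : Int) 2).foldl solutionStep (cs, [])).2 = chunks cs := by
  by_cases hpar : cs.length % 2 = 0
  · have h := Aeven cs [] [] (by simp) hpar
    norm_num at h
    rw [h]
  · have hodd : cs.length % 2 = 1 := by omega
    have hpos : (0 : Int) < (cs.length : Int) := by
      cases cs with
      | nil => simp at hodd
      | cons a t => simp
    rw [pyRange2_cons 0 (cs.length : Int) hpos, List.foldl_cons]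
    have hsl : PySem.List.slice (cs ++ ['_']) none (some (2 : Int)) = (cs ++ ['_']).take 2 := by
      have hx := PySem.List.slice_to_natCast (cs ++ ['_']) 2
      push_cast at hx
      exact hx
    have hstep : solutionStep (cs, []) 0 = (cs ++ ['_'], [(cs ++ ['_']).take 2]) := by
      simp only [solutionStep]
      rw [if_neg hpar]
      show (cs ++ ['_'], [PySem.List.slice (cs ++ ['_']) (some 0) (some (0 + 2))])
          = (cs ++ ['_'], [(cs ++ ['_']).take 2])
      rw [show ((0 : Int) + 2) = (2 : Int) by norm_num]
      rw [PySem.List.slice_zero_start, hsl]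
    rw [hstep]
    have hlen' : (cs ++ ['_']).length = cs.length + 1 := by simp
    obtain ⟨a, b, t, hcs'⟩ : ∃ a b t, cs ++ ['_'] = a :: b :: t := by
      cases cs with
      | nil => simp at hodd
      | cons x cs2 =>
          cases cs2 with
          | nil => exact ⟨x, '_', [], rfl⟩
          | cons y t2 => exact ⟨x, y, t2 ++ ['_'], by simp⟩
    rw [show (0 : Int) + 2 = 2 by norm_num, pyRange2_odd cs.length hodd]
    have hlenabc : (a :: b :: t).length = cs.length + 1 := by rw [← hcs']; simp
    simp only [List.length_cons] at hlenabc
    have ht2 : t.length % 2 = 0 := by omega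
    have ih' := Aeven t [a, b] [[a, b]] (by norm_num) ht2
    norm_num at ih'
    rw [hcs']
    simp only [List.take_succ_cons, List.take_zero]
    rw [show (cs.length : Int) + 1 = 2 + (t.length : Int) by omega]
    rw [ih']
    show [[a, b]] ++ chunks t = chunks cs
    have hch : chunks (a :: b :: t) = [a, b] :: chunks t := rfl
    rw [← hcs', chunks_pad cs hodd] at hch
    rw [hch]
    rfl

-- ===== VERDICT (by name: the statement is the Claim_ definition above) =====
theorem solution_spec : Claim_equal_solution := by
  intro s _
  unfold Spec_solution solution solution_alt
  rw [A_chunks s.toList, foldB s.toList [] (Or.inl rfl)]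
  rw [List.append_nil, B_chunks]
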